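-- pv_equiv track=rewrite | github.com/meghanvoneill/CS5340 | project/qa.py | choose_answer_candidates
-- ===== SOURCE A (Python) =====
-- def choose_answer_candidates(question, entity_type, ner_tree, entities, spacy_results, numbers):
--
--     candidate_answers = []
--
--     if entity_type == 0:
--         candidate_answers.append([word for word, label in spacy_results if label == 'PERSON'])
--         candidate_answers.append([word for word, label in spacy_results if label == 'ORG'])
--         candidate_answers.append([word for word, label in spacy_results if label == 'NORP'])
--         candidate_answers.append(entities['PERSON'])
--         candidate_answers.append(entities['ORGANIZATION'])
--     elif entity_type == 1:
--         candidate_answers.append([word for word, label in spacy_results if label == 'LOC'])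
--         candidate_answers.append([word for word, label in spacy_results if label == 'GPE'])
--         candidate_answers.append([word for word, label in spacy_results if label == 'FAC'])
--         candidate_answers.append(entities['GPE'])
--     elif entity_type == 2:
--         candidate_answers.append([word for word, label in spacy_results if label == 'DATE'])
--         candidate_answers.append([word for word, label in spacy_results if label == 'TIME'])
--         # candidate_answers.append(entities['GPE'])
--         # candidate_answers.append(numbers)
--     elif entity_type == 3:
--         candidate_answers.append([word for word, label in spacy_results if label == 'PERSON'])
--         candidate_answers.append([word for word, label in spacy_results if label == 'ORG'])
--         candidate_answers.append([word for word, label in spacy_results if label == 'WORK_OF_ART'])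
--         candidate_answers.append([word for word, label in spacy_results if label == 'LAW'])
--         candidate_answers.append(entities['PERSON'])
--         candidate_answers.append(entities['ORGANIZATION'])
--     elif entity_type == 4:
--         candidate_answers.append(['$' + word for word, label in spacy_results if label == 'MONEY'])
--         candidate_answers.append([word for word, label in spacy_results if label == 'QUANTITY'])
--         # candidate_answers.append(numbers)
--     elif entity_type == 5:
--         candidate_answers.append([word for word, label in spacy_results if label == 'LOC'])
--         # candidate_answers.append(entities['GPE'])
--
--     candidates = []
--     for arr in candidate_answers:
--         for word in arr:
--             if word not in candidates:
--                 candidates.append(word)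
--
--     # Remove partial duplicates.
--     cleaned_candidates = []
--
--     # for word in candidates:
--     #     duplicate = False
--     #     split_word = word.split()
--     #     for w in split_word:
--     #         if w in cleaned_candidates:
--     #             duplicate = True
--     #     if not duplicate:
--     #         cleaned_candidates.append(word)
--
--     cleaned_candidates = condense_answer_options(candidates)
--
--     return cleaned_candidates
--
-- def condense_answer_options(answers):
--
--     length_sorted_answers = sorted(answers, key=len)
--     new_answers = []
--
--     # Grab the words by the shortest first.
--     for short_answer in length_sorted_answers:
--         # For each answer to compare this to, if we find any that contain this answer already, do not add
--         # the short answer.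
--         add = True
--         found_duplicate_component = False
--         for answer in length_sorted_answers:
--             # Skip if comparing to itself.
--             if short_answer == answer:
--                 continue
--             else:
--                 answer_split = answer.split()
--                 # If the short answer is contained by the answer, we have found a duplicate.
--                 if short_answer in answer_split:
--                     found_duplicate_component = True
--                     continue
--
--         if found_duplicate_component:
--             add = False
--         if add:
--             new_answers.append(short_answer)
--
--     return new_answers
-- ===== SOURCE B (Python) =====
-- def choose_answer_candidates(question, entity_type, ner_tree, entities, spacy_results, numbers):
--     TABLE = {
--         0: (['PERSON', 'ORG', 'NORP'], ['PERSON', 'ORGANIZATION']),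
--         1: (['LOC', 'GPE', 'FAC'], ['GPE']),
--         2: (['DATE', 'TIME'], []),
--         3: (['PERSON', 'ORG', 'WORK_OF_ART', 'LAW'], ['PERSON', 'ORGANIZATION']),
--         4: (['MONEY', 'QUANTITY'], []),
--         5: (['LOC'], []),
--     }
--     labels, keys = TABLE.get(entity_type, ([], []))
--     groups = [[('$' + w) if lab == 'MONEY' else w for w, l in spacy_results if l == lab]
--               for lab in labels] + [entities[k] for k in keys]
--
--     # One order-preserving dedup pass, with a seen-set.
--     seen = set()
--     candidates = []
--     for arr in groups:
--         for w in arr: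
--             if w not in seen:
--                 seen.add(w)
--                 candidates.append(w)
--
--     # For each token, count in how many candidates it occurs as a whitespace-separated word.
--     tok_count = {}
--     for ans in candidates:
--         for t in set(ans.split()):
--             tok_count[t] = tok_count.get(t, 0) + 1
--
--     # Keep (shortest first, stable) every candidate that is not a word of a DIFFERENT candidate.
--     return [a for a in sorted(candidates, key=len)
--             if tok_count.get(a, 0) == (1 if a in a.split() else 0)]
-- ===== Notes on version B (the rewrite author's own statement) =====
-- stated objective: alternative
-- what changed: Replaces the if/elif branch chain by a label/key table, the 'not in candidates' list-scan dedup by a single pass with a seen-set, and the all-pairs containment scan in condense_answer_options by a token-counting dictionary built in one pass with a per-candidate lookup.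
import Mathlib
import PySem

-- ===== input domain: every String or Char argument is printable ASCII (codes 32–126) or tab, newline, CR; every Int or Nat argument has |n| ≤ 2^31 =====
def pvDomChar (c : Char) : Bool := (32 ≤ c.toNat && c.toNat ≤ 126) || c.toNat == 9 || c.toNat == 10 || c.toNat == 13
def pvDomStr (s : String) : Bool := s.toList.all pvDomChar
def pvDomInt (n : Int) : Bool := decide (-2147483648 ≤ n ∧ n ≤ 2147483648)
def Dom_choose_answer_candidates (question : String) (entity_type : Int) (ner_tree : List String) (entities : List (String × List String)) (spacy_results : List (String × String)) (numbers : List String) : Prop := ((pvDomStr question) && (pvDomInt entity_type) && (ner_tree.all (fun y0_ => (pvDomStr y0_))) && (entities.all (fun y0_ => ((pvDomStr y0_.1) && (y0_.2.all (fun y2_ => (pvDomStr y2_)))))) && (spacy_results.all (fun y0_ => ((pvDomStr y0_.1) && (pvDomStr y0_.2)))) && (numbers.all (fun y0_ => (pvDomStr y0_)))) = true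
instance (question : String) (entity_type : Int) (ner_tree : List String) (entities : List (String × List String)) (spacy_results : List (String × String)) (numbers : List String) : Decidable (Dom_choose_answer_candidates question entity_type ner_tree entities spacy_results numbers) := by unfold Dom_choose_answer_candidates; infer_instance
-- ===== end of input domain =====

-- ===== PORT A =====
-- B changes the branch chain to a table, the quadratic dedup to a seen-set pass, and the all-pairs
-- containment scan to a token-count dictionary (objective: alternative).

-- entities[k] (Python dict lookup = first match in the association list); the `none` case is a
-- KeyError in Python — those inputs are excluded by Pre_choose_answer_candidates.
def pvEntGet (entities : List (String × List String)) (k : String) : List String :=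
  ((entities.find? (fun p => p.1 == k)).map (fun p => p.2)).getD []

def condense_answer_options (answers : List String) : List String :=
  let length_sorted_answers := PySem.List.sorted answers (fun s => PySem.Str.len s)
  length_sorted_answers.foldl (fun new_answers short_answer =>
    let found_duplicate_component :=
      length_sorted_answers.foldl (fun fd answer =>
        if short_answer == answer then fd
        else
          let answer_split := PySem.Str.split₀ answer
          if answer_split.contains short_answer then true else fd) false
    let add := true
    let add := if found_duplicate_component then false else add
    if add then new_answers ++ [short_answer] else new_answers) []

def choose_answer_candidates (question : String) (entity_type : Int) (ner_tree : List String) (entities : List (String × List String)) (spacy_results : List (String × String)) (numbers : List String) : List String :=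
  let candidate_answers : List (List String) :=
    if entity_type == 0 then
      [spacy_results.filterMap (fun wl => if wl.2 == "PERSON" then some wl.1 else none),
       spacy_results.filterMap (fun wl => if wl.2 == "ORG" then some wl.1 else none),
       spacy_results.filterMap (fun wl => if wl.2 == "NORP" then some wl.1 else none),
       pvEntGet entities "PERSON",
       pvEntGet entities "ORGANIZATION"]
    else if entity_type == 1 then
      [spacy_results.filterMap (fun wl => if wl.2 == "LOC" then some wl.1 else none),
       spacy_results.filterMap (fun wl => if wl.2 == "GPE" then some wl.1 else none),
       spacy_results.filterMap (fun wl => if wl.2 == "FAC" then some wl.1 else none),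
       pvEntGet entities "GPE"]
    else if entity_type == 2 then
      [spacy_results.filterMap (fun wl => if wl.2 == "DATE" then some wl.1 else none),
       spacy_results.filterMap (fun wl => if wl.2 == "TIME" then some wl.1 else none)]
    else if entity_type == 3 then
      [spacy_results.filterMap (fun wl => if wl.2 == "PERSON" then some wl.1 else none),
       spacy_results.filterMap (fun wl => if wl.2 == "ORG" then some wl.1 else none),
       spacy_results.filterMap (fun wl => if wl.2 == "WORK_OF_ART" then some wl.1 else none),
       spacy_results.filterMap (fun wl => if wl.2 == "LAW" then some wl.1 else none),
       pvEntGet entities "PERSON",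
       pvEntGet entities "ORGANIZATION"]
    else if entity_type == 4 then
      [spacy_results.filterMap (fun wl => if wl.2 == "MONEY" then some ("$" ++ wl.1) else none),
       spacy_results.filterMap (fun wl => if wl.2 == "QUANTITY" then some wl.1 else none)]
    else if entity_type == 5 then
      [spacy_results.filterMap (fun wl => if wl.2 == "LOC" then some wl.1 else none)]
    else []
  let candidates : List String :=
    candidate_answers.foldl (fun cands arr =>
      arr.foldl (fun cands word => if cands.contains word then cands else cands ++ [word]) cands) []
  condense_answer_options candidates

-- ===== PORT B =====
-- TABLE of Source B: entity_type -> (spaCy labels, entity-dict keys)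
def pvTable : PySem.Dict Int (List String × List String) :=
  PySem.Dict.ofList
    [(0, (["PERSON", "ORG", "NORP"], ["PERSON", "ORGANIZATION"])),
     (1, (["LOC", "GPE", "FAC"], ["GPE"])),
     (2, (["DATE", "TIME"], [])),
     (3, (["PERSON", "ORG", "WORK_OF_ART", "LAW"], ["PERSON", "ORGANIZATION"])),
     (4, (["MONEY", "QUANTITY"], [])),
     (5, (["LOC"], []))]

def choose_answer_candidates_alt (question : String) (entity_type : Int) (ner_tree : List String) (entities : List (String × List String)) (spacy_results : List (String × String)) (numbers : List String) : List String :=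
  let lk := pvTable.getD entity_type ([], [])
  let labels := lk.1
  let keys := lk.2
  let groups : List (List String) :=
    labels.map (fun lab => spacy_results.filterMap (fun wl =>
      if wl.2 == lab then some (if lab == "MONEY" then "$" ++ wl.1 else wl.1) else none))
    ++ keys.map (fun k => pvEntGet entities k)
  let sc : PySem.Set String × List String :=
    groups.foldl (fun sc arr =>
      arr.foldl (fun sc w =>
        if sc.1.contains w then sc else (PySem.Set.add sc.1 w, sc.2 ++ [w])) sc)
      (PySem.Set.empty, [])
  let candidates := sc.2
  let tok_count : PySem.Dict String Int :=
    candidates.foldl (fun d ans =>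
      (PySem.Set.ofList (PySem.Str.split₀ ans)).foldl
        (fun d t => d.insert t (d.getD t 0 + 1)) d)
      PySem.Dict.empty
  (PySem.List.sorted candidates (fun s => PySem.Str.len s)).filter (fun a =>
    tok_count.getD a 0 == (if (PySem.Str.split₀ a).contains a then (1 : Int) else 0))

-- ===== PRECONDITION & SPEC =====
-- Pre_ excludes exactly the inputs where Python A raises KeyError: entity_type 0/3 reads
-- entities['PERSON'] and entities['ORGANIZATION'], entity_type 1 reads entities['GPE'].
def Pre_choose_answer_candidates (question : String) (entity_type : Int) (ner_tree : List String) (entities : List (String × List String)) (spacy_results : List (String × String)) (numbers : List String) : Prop :=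
  ((entity_type = 0 ∨ entity_type = 3) →
      ("PERSON" ∈ entities.map Prod.fst ∧ "ORGANIZATION" ∈ entities.map Prod.fst)) ∧
  (entity_type = 1 → "GPE" ∈ entities.map Prod.fst)
instance (question : String) (entity_type : Int) (ner_tree : List String) (entities : List (String × List String)) (spacy_results : List (String × String)) (numbers : List String) : Decidable (Pre_choose_answer_candidates question entity_type ner_tree entities spacy_results numbers) := by unfold Pre_choose_answer_candidates; infer_instance

def pvWitness_choose_answer_candidates : String × Int × List String × (List (String × List String)) × (List (String × String)) × List String :=
  ("who", 0, [], [("PERSON", ["Ada Lovelace"]), ("ORGANIZATION", ["ACM"])], [("Ada", "PERSON")], [])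

def Spec_choose_answer_candidates (question : String) (entity_type : Int) (ner_tree : List String) (entities : List (String × List String)) (spacy_results : List (String × String)) (numbers : List String) (out : List String) : Prop := out = choose_answer_candidates_alt question entity_type ner_tree entities spacy_results numbers
instance (question : String) (entity_type : Int) (ner_tree : List String) (entities : List (String × List String)) (spacy_results : List (String × String)) (numbers : List String) (out : List String) : Decidable (Spec_choose_answer_candidates question entity_type ner_tree entities spacy_results numbers out) := by unfold Spec_choose_answer_candidates; infer_instance

-- ===== CLAIM (what is proved, stated in full; the proofs are below) =====
def Claim_equal_choose_answer_candidates : Prop := ∀ (question : String) (entity_type : Int) (ner_tree : List String) (entities : List (String × List String)) (spacy_results : List (String × String)) (numbers : List String), Dom_choose_answer_candidates question entity_type ner_tree entities spacy_results numbers → Pre_choose_answer_candidates question entity_type ner_tree entities spacy_results numbers → Spec_choose_answer_candidates question entity_type ner_tree entities spacy_results numbers (choose_answer_candidates question entity_type ner_tree entities spacy_results numbers)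

-- ===== LEMMAS AND PROOFS =====

-- The seen-set dedup pass of B computes A's quadratic dedup, and the seen set tracks membership.
theorem pv_dedup_arr (ws : List String) :
    ∀ (s cs : List String), (∀ x : String, x ∈ s ↔ x ∈ cs) →
      (ws.foldl (fun sc w =>
          if sc.1.contains w then sc else (PySem.Set.add sc.1 w, sc.2 ++ [w])) (s, cs)).2
        = ws.foldl (fun cands word =>
            if cands.contains word then cands else cands ++ [word]) cs ∧
      (∀ x : String,
        x ∈ (ws.foldl (fun sc w =>
          if sc.1.contains w then sc else (PySem.Set.add sc.1 w, sc.2 ++ [w])) (s, cs)).1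
        ↔ x ∈ ws.foldl (fun cands word =>
            if cands.contains word then cands else cands ++ [word]) cs) := by
  induction ws with
  | nil => intro s cs h; exact ⟨rfl, h⟩
  | cons w t ih =>
    intro s cs h
    by_cases hw : w ∈ cs
    · have hs : s.contains w = true := by rw [List.contains_iff_mem]; exact (h w).mpr hw
      have hc : cs.contains w = true := by rw [List.contains_iff_mem]; exact hw
      simp only [List.foldl_cons, hs, hc, if_true]
      exact ih s cs h
    · have hsm : ¬ w ∈ s := fun hx => hw ((h w).mp hx)
      have hs : s.contains w = false := by simp [hsm]
      have hc : cs.contains w = false := by simp [hw]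
      simp only [List.foldl_cons, hs, hc, Bool.false_eq_true, if_false]
      rw [PySem.Set.add_of_not_mem hsm]
      exact ih (s ++ [w]) (cs ++ [w]) (by intro x; simp [h x])

theorem pv_dedup_groups (gs : List (List String)) :
    ∀ (s cs : List String), (∀ x : String, x ∈ s ↔ x ∈ cs) →
      (gs.foldl (fun sc arr =>
          arr.foldl (fun sc w =>
            if sc.1.contains w then sc else (PySem.Set.add sc.1 w, sc.2 ++ [w])) sc) (s, cs)).2
        = gs.foldl (fun cands arr =>
            arr.foldl (fun cands word =>
              if cands.contains word then cands else cands ++ [word]) cands) cs := by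
  induction gs with
  | nil => intro s cs h; rfl
  | cons g t ih =>
    intro s cs h
    simp only [List.foldl_cons]
    obtain ⟨h1, h2⟩ := pv_dedup_arr g s cs h
    have hg : g.foldl (fun sc w =>
        if sc.1.contains w then sc else (PySem.Set.add sc.1 w, sc.2 ++ [w])) (s, cs)
      = ((g.foldl (fun sc w =>
          if sc.1.contains w then sc else (PySem.Set.add sc.1 w, sc.2 ++ [w])) (s, cs)).1,
         g.foldl (fun cands word =>
           if cands.contains word then cands else cands ++ [word]) cs) := by
      rw [← h1]
    rw [hg]
    exact ih _ _ h2

theorem pv_nodup_arr (ws : List String) :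
    ∀ (cs : List String), cs.Nodup →
      (ws.foldl (fun cands word =>
        if cands.contains word then cands else cands ++ [word]) cs).Nodup := by
  induction ws with
  | nil => intro cs h; exact h
  | cons w t ih =>
    intro cs h
    by_cases hw : w ∈ cs
    · simp only [List.foldl_cons, List.contains_iff_mem.mpr hw, if_true]
      exact ih cs h
    · have hc : cs.contains w = false := by simp [hw]
      simp only [List.foldl_cons, hc, Bool.false_eq_true, if_false]
      refine ih (cs ++ [w]) ?_
      simp [List.nodup_append, h]
      exact fun a hac hEq => hw (hEq ▸ hac)

theorem pv_nodup_groups (gs : List (List String)) :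
    ∀ (cs : List String), cs.Nodup →
      (gs.foldl (fun cands arr =>
        arr.foldl (fun cands word =>
          if cands.contains word then cands else cands ++ [word]) cands) cs).Nodup := by
  induction gs with
  | nil => intro cs h; exact h
  | cons g t ih =>
    intro cs h
    simp only [List.foldl_cons]
    exact ih _ (pv_nodup_arr g cs h)

-- B's token-count dictionary counts, for each token, the candidates containing it as a word.
theorem pv_tok_getD (cs : List String) (a : String) :
    ∀ d : PySem.Dict String Int,
      (cs.foldl (fun d ans =>
          (PySem.Set.ofList (PySem.Str.split₀ ans)).foldl
            (fun d t => d.insert t (d.getD t 0 + 1)) d) d).getD a 0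
        = d.getD a 0 + (cs.countP (fun y => (PySem.Str.split₀ y).contains a) : Int) := by
  induction cs with
  | nil => intro d; simp
  | cons y t ih =>
    intro d
    simp only [List.foldl_cons, List.countP_cons]
    rw [ih, PySem.Dict.getD_foldl_insert_add_one]
    by_cases hy : a ∈ PySem.Str.split₀ y
    · have h1 : (PySem.Set.ofList (PySem.Str.split₀ y)).count a = 1 :=
        List.count_eq_one_of_mem (PySem.Set.nodup_ofList _)
          (by rw [PySem.Set.mem_ofList]; exact hy)
      have h2 : (PySem.Str.split₀ y).contains a = true := by simp [hy]
      rw [h1]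
      simp only [h2, if_true]
      push_cast
      ring
    · have h1 : (PySem.Set.ofList (PySem.Str.split₀ y)).count a = 0 :=
        List.count_eq_zero_of_not_mem (by rw [PySem.Set.mem_ofList]; exact hy)
      have h2 : (PySem.Str.split₀ y).contains a = false := by simp [hy]
      rw [h1]
      simp only [h2, Bool.false_eq_true, if_false]
      push_cast
      ring

-- A's inner scan computes "a is a word of some other answer".
theorem pv_found_eq (ls : List String) (a : String) :
    ls.foldl (fun fd answer =>
        if a == answer then fd
        else if (PySem.Str.split₀ answer).contains a then true else fd) false
      = ls.any (fun y => !(a == y) && (PySem.Str.split₀ y).contains a) := by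
  have h : ls.foldl (fun fd answer =>
        if a == answer then fd
        else if (PySem.Str.split₀ answer).contains a then true else fd) false
      = ls.foldl (fun fd y =>
          if (!(a == y) && (PySem.Str.split₀ y).contains a) then true else fd) false := by
    apply PySem.List.foldl_congr_mem
    intro fd y _
    by_cases hy : a == y
    · simp [hy]
    · simp only [hy, Bool.false_eq_true, if_false, Bool.not_false]
      cases hc : (PySem.Str.split₀ y).contains a <;> simp [hy, hc]
  rw [h, PySem.List.foldl_if_true_eq]
  simp

-- On a duplicate-free candidate list, A's condense equals B's token-count filter.
theorem pv_condense_eq (cs : List String) (hnd : cs.Nodup) :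
    condense_answer_options cs
      = (PySem.List.sorted cs (fun s => PySem.Str.len s)).filter (fun a =>
          (cs.foldl (fun d ans =>
              (PySem.Set.ofList (PySem.Str.split₀ ans)).foldl
                (fun d t => d.insert t (d.getD t 0 + 1)) d) PySem.Dict.empty).getD a 0
            == (if (PySem.Str.split₀ a).contains a then (1 : Int) else 0)) := by
  unfold condense_answer_options
  set ls := PySem.List.sorted cs (fun s => PySem.Str.len s) with hls
  have hstep : ls.foldl (fun new_answers short_answer =>
      let found_duplicate_component :=
        ls.foldl (fun fd answer =>
          if short_answer == answer then fd
          else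
            let answer_split := PySem.Str.split₀ answer
            if answer_split.contains short_answer then true else fd) false
      let add := true
      let add := if found_duplicate_component then false else add
      if add then new_answers ++ [short_answer] else new_answers) []
    = ls.foldl (fun acc a =>
        if (!(ls.any (fun y => !(a == y) && (PySem.Str.split₀ y).contains a))) then acc ++ [a]
        else acc) [] := by
    apply PySem.List.foldl_congr_mem
    intro acc a _
    simp only [pv_found_eq ls a]
    cases hA : ls.any (fun y => !(a == y) && (PySem.Str.split₀ y).contains a) <;> simp
  rw [hstep, PySem.List.foldl_append_if_eq_filter]
  rw [List.nil_append]
  apply List.filter_congr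
  intro a ha
  have hac : a ∈ cs := (PySem.List.mem_sorted _ _ _ _).mp ha
  rw [pv_tok_getD cs a PySem.Dict.empty]
  have hempty : (PySem.Dict.empty : PySem.Dict String Int).getD a 0 = 0 := rfl
  rw [hempty, zero_add]
  have hperm : cs.Perm (a :: cs.erase a) := List.perm_cons_erase hac
  have hcount : cs.countP (fun y => (PySem.Str.split₀ y).contains a)
      = (cs.erase a).countP (fun y => (PySem.Str.split₀ y).contains a)
        + (if (PySem.Str.split₀ a).contains a then 1 else 0) := by
    rw [hperm.countP_eq]; simp [List.countP_cons]
  have hany : (ls.any fun y => !(a == y) && (PySem.Str.split₀ y).contains a)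
      = (cs.erase a).any (fun y => (PySem.Str.split₀ y).contains a) := by
    rw [Bool.eq_iff_iff]
    simp only [List.any_eq_true]
    constructor
    · rintro ⟨y, hy, hq⟩
      rw [Bool.and_eq_true, Bool.not_eq_true', beq_eq_false_iff_ne] at hq
      refine ⟨y, ?_, hq.2⟩
      exact (List.Nodup.mem_erase_iff hnd).mpr ⟨Ne.symm hq.1, (PySem.List.mem_sorted _ _ _ _).mp hy⟩
    · rintro ⟨y, hy, hq⟩
      obtain ⟨hne, hyc⟩ := (List.Nodup.mem_erase_iff hnd).mp hy
      refine ⟨y, (PySem.List.mem_sorted _ _ _ _).mpr hyc, ?_⟩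
      rw [Bool.and_eq_true, Bool.not_eq_true', beq_eq_false_iff_ne]
      exact ⟨Ne.symm hne, hq⟩
  rw [hany, hcount]
  cases hA : (cs.erase a).any (fun y => (PySem.Str.split₀ y).contains a)
  · have hz : (cs.erase a).countP (fun y => (PySem.Str.split₀ y).contains a) = 0 := by
      rw [List.countP_eq_zero]
      intro y hy
      have := List.any_eq_false.mp hA y hy
      simpa using this
    rw [hz]
    rcases Bool.eq_false_or_eq_true ((PySem.Str.split₀ a).contains a) with hPa | hPa <;> simp [hPa]
  · rw [Bool.not_true]
    symm
    rw [beq_eq_false_iff_ne]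
    by_cases hPa : a ∈ PySem.Str.split₀ a
    · have hco : ((PySem.Str.split₀ a).contains a) = true := by simpa using hPa
      rw [hco]
      simp
      obtain ⟨y, hy, hq⟩ := List.any_eq_true.mp hA
      exact ⟨y, hy, by simpa using hq⟩
    · have hco : ((PySem.Str.split₀ a).contains a) = false := by simpa using hPa
      rw [hco]
      simp
      obtain ⟨y, hy, hq⟩ := List.any_eq_true.mp hA
      exact ⟨y, hy, by simpa using hq⟩

-- Proof-side views of the two pipelines (A: quadratic dedup + condense; B: set dedup + count filter).
def pvPipeA (gs : List (List String)) : List String :=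
  condense_answer_options
    (gs.foldl (fun cands arr =>
      arr.foldl (fun cands word =>
        if cands.contains word then cands else cands ++ [word]) cands) [])

def pvPipeB (gs : List (List String)) : List String :=
  let sc : PySem.Set String × List String :=
    gs.foldl (fun sc arr =>
      arr.foldl (fun sc w =>
        if sc.1.contains w then sc else (PySem.Set.add sc.1 w, sc.2 ++ [w])) sc)
      (PySem.Set.empty, [])
  let candidates := sc.2
  (PySem.List.sorted candidates (fun s => PySem.Str.len s)).filter (fun a =>
    (candidates.foldl (fun d ans =>
        (PySem.Set.ofList (PySem.Str.split₀ ans)).foldl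
          (fun d t => d.insert t (d.getD t 0 + 1)) d) PySem.Dict.empty).getD a 0
      == (if (PySem.Str.split₀ a).contains a then (1 : Int) else 0))

-- Master lemma: on identical group lists, A's pipeline equals B's pipeline.
theorem pv_master (gs : List (List String)) : pvPipeA gs = pvPipeB gs := by
  unfold pvPipeA pvPipeB
  have h := pv_dedup_groups gs PySem.Set.empty [] (fun x => Iff.rfl)
  rw [← h]
  exact pv_condense_eq _ (by rw [h]; exact pv_nodup_groups gs [] List.nodup_nil)

theorem pv_htab : pvTable = PySem.Dict.mk
    [(0, (["PERSON", "ORG", "NORP"], ["PERSON", "ORGANIZATION"])),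
     (1, (["LOC", "GPE", "FAC"], ["GPE"])),
     (2, (["DATE", "TIME"], [])),
     (3, (["PERSON", "ORG", "WORK_OF_ART", "LAW"], ["PERSON", "ORGANIZATION"])),
     (4, (["MONEY", "QUANTITY"], [])),
     (5, (["LOC"], []))] := by rfl

theorem pv_table_default (et : Int) (h0 : et ≠ 0) (h1 : et ≠ 1) (h2 : et ≠ 2) (h3 : et ≠ 3)
    (h4 : et ≠ 4) (h5 : et ≠ 5) : pvTable.getD et ([], []) = ([], []) := by
  rw [pv_htab]
  simp [PySem.Dict.getD, PySem.Dict.get?_mk_cons, PySem.Dict.get?, Ne.symm h0, Ne.symm h1,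
    Ne.symm h2, Ne.symm h3, Ne.symm h4, Ne.symm h5]

theorem pv_t0 : pvTable.getD 0 ([], []) = (["PERSON", "ORG", "NORP"], ["PERSON", "ORGANIZATION"]) := rfl
theorem pv_t1 : pvTable.getD 1 ([], []) = (["LOC", "GPE", "FAC"], ["GPE"]) := rfl
theorem pv_t2 : pvTable.getD 2 ([], []) = (["DATE", "TIME"], []) := rfl
theorem pv_t3 : pvTable.getD 3 ([], []) = (["PERSON", "ORG", "WORK_OF_ART", "LAW"], ["PERSON", "ORGANIZATION"]) := rfl
theorem pv_t4 : pvTable.getD 4 ([], []) = (["MONEY", "QUANTITY"], []) := rfl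
theorem pv_t5 : pvTable.getD 5 ([], []) = (["LOC"], []) := rfl

-- The two group lists coincide for every entity_type.
theorem pv_groups_eq (entity_type : Int) (entities : List (String × List String))
    (spacy_results : List (String × String)) :
    (if entity_type == 0 then
      [spacy_results.filterMap (fun wl => if wl.2 == "PERSON" then some wl.1 else none),
       spacy_results.filterMap (fun wl => if wl.2 == "ORG" then some wl.1 else none),
       spacy_results.filterMap (fun wl => if wl.2 == "NORP" then some wl.1 else none),
       pvEntGet entities "PERSON",
       pvEntGet entities "ORGANIZATION"]
    else if entity_type == 1 then
      [spacy_results.filterMap (fun wl => if wl.2 == "LOC" then some wl.1 else none),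
       spacy_results.filterMap (fun wl => if wl.2 == "GPE" then some wl.1 else none),
       spacy_results.filterMap (fun wl => if wl.2 == "FAC" then some wl.1 else none),
       pvEntGet entities "GPE"]
    else if entity_type == 2 then
      [spacy_results.filterMap (fun wl => if wl.2 == "DATE" then some wl.1 else none),
       spacy_results.filterMap (fun wl => if wl.2 == "TIME" then some wl.1 else none)]
    else if entity_type == 3 then
      [spacy_results.filterMap (fun wl => if wl.2 == "PERSON" then some wl.1 else none),
       spacy_results.filterMap (fun wl => if wl.2 == "ORG" then some wl.1 else none),
       spacy_results.filterMap (fun wl => if wl.2 == "WORK_OF_ART" then some wl.1 else none),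
       spacy_results.filterMap (fun wl => if wl.2 == "LAW" then some wl.1 else none),
       pvEntGet entities "PERSON",
       pvEntGet entities "ORGANIZATION"]
    else if entity_type == 4 then
      [spacy_results.filterMap (fun wl => if wl.2 == "MONEY" then some ("$" ++ wl.1) else none),
       spacy_results.filterMap (fun wl => if wl.2 == "QUANTITY" then some wl.1 else none)]
    else if entity_type == 5 then
      [spacy_results.filterMap (fun wl => if wl.2 == "LOC" then some wl.1 else none)]
    else [])
    = ((pvTable.getD entity_type ([], [])).1.map (fun lab => spacy_results.filterMap (fun wl =>
        if wl.2 == lab then some (if lab == "MONEY" then "$" ++ wl.1 else wl.1) else none))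
      ++ (pvTable.getD entity_type ([], [])).2.map (fun k => pvEntGet entities k)) := by
  by_cases h0 : entity_type = 0
  · subst h0
    simp only [pv_t0, Int.reduceBEq, reduceIte, String.reduceBEq, Bool.false_eq_true, if_false,
      List.map_cons, List.map_nil, List.cons_append, List.nil_append]
  by_cases h1 : entity_type = 1
  · subst h1
    simp only [pv_t1, Int.reduceBEq, reduceIte, String.reduceBEq, Bool.false_eq_true, if_false,
      List.map_cons, List.map_nil, List.cons_append, List.nil_append]
  by_cases h2 : entity_type = 2
  · subst h2
    simp only [pv_t2, Int.reduceBEq, reduceIte, String.reduceBEq, Bool.false_eq_true, if_false,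
      List.map_cons, List.map_nil, List.cons_append, List.nil_append]
  by_cases h3 : entity_type = 3
  · subst h3
    simp only [pv_t3, Int.reduceBEq, reduceIte, String.reduceBEq, Bool.false_eq_true, if_false,
      List.map_cons, List.map_nil, List.cons_append, List.nil_append]
  by_cases h4 : entity_type = 4
  · subst h4
    simp only [pv_t4, Int.reduceBEq, reduceIte, String.reduceBEq, Bool.false_eq_true, if_false,
      List.map_cons, List.map_nil, List.cons_append, List.nil_append]
  by_cases h5 : entity_type = 5
  · subst h5
    simp only [pv_t5, Int.reduceBEq, reduceIte, String.reduceBEq, Bool.false_eq_true, if_false,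
      List.map_cons, List.map_nil, List.cons_append, List.nil_append]
  · have c0 : (entity_type == (0 : Int)) = false := beq_eq_false_iff_ne.mpr h0
    have c1 : (entity_type == (1 : Int)) = false := beq_eq_false_iff_ne.mpr h1
    have c2 : (entity_type == (2 : Int)) = false := beq_eq_false_iff_ne.mpr h2
    have c3 : (entity_type == (3 : Int)) = false := beq_eq_false_iff_ne.mpr h3
    have c4 : (entity_type == (4 : Int)) = false := beq_eq_false_iff_ne.mpr h4
    have c5 : (entity_type == (5 : Int)) = false := beq_eq_false_iff_ne.mpr h5
    simp only [c0, c1, c2, c3, c4, c5, Bool.false_eq_true, if_false,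
      pv_table_default entity_type h0 h1 h2 h3 h4 h5, List.map_nil, List.nil_append]

-- ===== VERDICT (by name: the statement is the Claim_ definition above) =====
theorem choose_answer_candidates_spec : Claim_equal_choose_answer_candidates := by
  intro question entity_type ner_tree entities spacy_results numbers hDom hPre
  unfold Spec_choose_answer_candidates
  have hA : choose_answer_candidates question entity_type ner_tree entities spacy_results numbers
      = pvPipeA (if entity_type == 0 then
      [spacy_results.filterMap (fun wl => if wl.2 == "PERSON" then some wl.1 else none),
       spacy_results.filterMap (fun wl => if wl.2 == "ORG" then some wl.1 else none),
       spacy_results.filterMap (fun wl => if wl.2 == "NORP" then some wl.1 else none),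
       pvEntGet entities "PERSON",
       pvEntGet entities "ORGANIZATION"]
    else if entity_type == 1 then
      [spacy_results.filterMap (fun wl => if wl.2 == "LOC" then some wl.1 else none),
       spacy_results.filterMap (fun wl => if wl.2 == "GPE" then some wl.1 else none),
       spacy_results.filterMap (fun wl => if wl.2 == "FAC" then some wl.1 else none),
       pvEntGet entities "GPE"]
    else if entity_type == 2 then
      [spacy_results.filterMap (fun wl => if wl.2 == "DATE" then some wl.1 else none),
       spacy_results.filterMap (fun wl => if wl.2 == "TIME" then some wl.1 else none)]
    else if entity_type == 3 then
      [spacy_results.filterMap (fun wl => if wl.2 == "PERSON" then some wl.1 else none),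
       spacy_results.filterMap (fun wl => if wl.2 == "ORG" then some wl.1 else none),
       spacy_results.filterMap (fun wl => if wl.2 == "WORK_OF_ART" then some wl.1 else none),
       spacy_results.filterMap (fun wl => if wl.2 == "LAW" then some wl.1 else none),
       pvEntGet entities "PERSON",
       pvEntGet entities "ORGANIZATION"]
    else if entity_type == 4 then
      [spacy_results.filterMap (fun wl => if wl.2 == "MONEY" then some ("$" ++ wl.1) else none),
       spacy_results.filterMap (fun wl => if wl.2 == "QUANTITY" then some wl.1 else none)]
    else if entity_type == 5 then
      [spacy_results.filterMap (fun wl => if wl.2 == "LOC" then some wl.1 else none)]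
    else []) := rfl
  have hB : choose_answer_candidates_alt question entity_type ner_tree entities spacy_results numbers
      = pvPipeB ((pvTable.getD entity_type ([], [])).1.map (fun lab =>
            spacy_results.filterMap (fun wl =>
              if wl.2 == lab then some (if lab == "MONEY" then "$" ++ wl.1 else wl.1) else none))
          ++ (pvTable.getD entity_type ([], [])).2.map (fun k => pvEntGet entities k)) := rfl
  rw [hA, hB, ← pv_groups_eq entity_type entities spacy_results]
  exact pv_master _
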